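-- pv_equiv track=rewrite | github.com/eliottcassidy2000/math | 04-computation/drt_n11_analysis.py | is_doubly_regular
-- ===== SOURCE A (Python) =====
-- def is_doubly_regular(T, n):
--     """Check if T is doubly regular."""
--     k = (n-1) // 2
--     for v in range(n):
--         if sum(T[v]) != k:
--             return False
--     target = (n - 3) // 4
--     for u in range(n):
--         for v in range(u+1, n):
--             common = sum(1 for w in range(n) if w != u and w != v and T[u][w] and T[v][w])
--             if common != target:
--                 return False
--     return True
-- ===== SOURCE B (Python) =====
-- def is_doubly_regular(T, n):
--     """Check if T is doubly regular."""
--     k = (n - 1) // 2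
--     for v in range(n):
--         if sum(T[v]) != k:
--             return False
--     # scatter pass: each column c contributes one common neighbor to every
--     # ordered pair (u, v), u < v, of rows with a truthy entry in column c
--     pairs = []
--     for c in range(n):
--         rows = [r for r in range(n) if r != c and T[r][c]]
--         for i, u in enumerate(rows):
--             for v in rows[i + 1:]:
--                 pairs.append((u, v))
--     C = {}
--     for p in pairs:
--         C[p] = C.get(p, 0) + 1
--     target = (n - 3) // 4
--     for u in range(n):
--         for v in range(u + 1, n):
--             if C.get((u, v), 0) != target:
--                 return False
--     return True
-- ===== Notes on version B (the rewrite author's own statement) =====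
-- stated objective: alternative
-- what changed: Instead of recomputing each pair's common-neighbor count by an O(n) scan per pair, B makes one scatter pass over the columns, emitting a pair (u,v) for every two rows with a truthy entry in that column, tallies the pairs in a dict counter, and then only reads the counter in the final pair check.
-- outside the precondition, e.g. on is_doubly_regular([[0, 0, 1], [0, 0, 1], [1]], 3): A returns False, B raises IndexError
import Mathlib
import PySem

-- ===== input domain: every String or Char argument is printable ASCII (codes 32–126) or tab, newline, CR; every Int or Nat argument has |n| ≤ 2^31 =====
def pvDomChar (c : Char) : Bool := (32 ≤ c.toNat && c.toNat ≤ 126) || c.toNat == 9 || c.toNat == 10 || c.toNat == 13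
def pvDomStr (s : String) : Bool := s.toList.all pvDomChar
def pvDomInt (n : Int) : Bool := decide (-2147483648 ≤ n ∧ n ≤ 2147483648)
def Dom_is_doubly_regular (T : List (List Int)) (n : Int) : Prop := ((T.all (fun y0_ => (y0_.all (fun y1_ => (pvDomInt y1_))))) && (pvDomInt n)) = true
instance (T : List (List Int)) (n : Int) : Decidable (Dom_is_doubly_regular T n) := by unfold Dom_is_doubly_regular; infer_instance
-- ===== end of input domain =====

-- B replaces A's per-pair O(n) rescans by one scatter pass: each column contributes a
-- common neighbor to every pair of rows with a truthy entry there, tallied in a counter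
-- dict that the final pair check only reads (objective: alternative decomposition).

-- ===== PORT A =====
-- 'for v in range(n): if sum(T[v]) != k: return False' — early-exit loop, shared verbatim by A and B
def pvRowCheck (T : List (List Int)) (n k v : Int) : Bool :=
  if h : v < n then
    if (PySem.List.pyGetD T v []).sum ≠ k then false
    else pvRowCheck T n k (v + 1)
  else true
termination_by (n - v).toNat
decreasing_by omega

def is_doubly_regular (T : List (List Int)) (n : Int) : Bool :=
  let k := PySem.Int.floordiv (n - 1) 2
  if pvRowCheck T n k 0 then
    let target := PySem.Int.floordiv (n - 3) 4
    (PySem.List.pyRange 0 n).all (fun u =>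
      (PySem.List.pyRange (u + 1) n).all (fun v =>
        -- sum(1 for w in range(n) if …) = count of the w satisfying the filter
        (((PySem.List.pyRange 0 n).countP (fun w =>
            decide (w ≠ u) && decide (w ≠ v) &&
            decide (PySem.List.pyGetD (PySem.List.pyGetD T u []) w 0 ≠ 0) &&
            decide (PySem.List.pyGetD (PySem.List.pyGetD T v []) w 0 ≠ 0)) : Int) == target)))
  else false

-- ===== PORT B =====
-- rows = [r for r in range(n) if r != c and T[r][c]]
def pvRows (T : List (List Int)) (n c : Int) : List Int :=
  (PySem.List.pyRange 0 n).filter (fun r =>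
    decide (r ≠ c) && decide (PySem.List.pyGetD (PySem.List.pyGetD T r []) c 0 ≠ 0))

-- for i, u in enumerate(rows): for v in rows[i+1:]: pairs.append((u, v))
def pvPairs : List Int → List (Int × Int)
  | [] => []
  | u :: rest => rest.map (fun v => (u, v)) ++ pvPairs rest

def is_doubly_regular_alt (T : List (List Int)) (n : Int) : Bool :=
  let k := PySem.Int.floordiv (n - 1) 2
  if pvRowCheck T n k 0 then
    let pairs := (PySem.List.pyRange 0 n).foldl (fun acc c => acc ++ pvPairs (pvRows T n c)) []
    let C := pairs.foldl (fun d p => d.insert p (d.getD p 0 + 1))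
               (PySem.Dict.empty : PySem.Dict (Int × Int) Int)
    let target := PySem.Int.floordiv (n - 3) 4
    (PySem.List.pyRange 0 n).all (fun u =>
      (PySem.List.pyRange (u + 1) n).all (fun v =>
        (C.getD (u, v) 0 == target)))
  else false

-- ===== PRECONDITION & SPEC =====
-- Pre_ admits every input whose row-sum check fails (both programs stop there identically)
-- and every well-shaped input (n ≤ len(T), first n rows of length ≥ n); it excludes only
-- shape-mismatched inputs that survive the row-sum check, where A raises IndexError or
-- returns early only because of which missing entries it happens to read first, while
-- B's scatter pass reads every T[r][c] with r, c < n.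
def Pre_is_doubly_regular (T : List (List Int)) (n : Int) : Prop :=
  (∃ row ∈ T.take n.toNat, row.sum ≠ PySem.Int.floordiv (n - 1) 2) ∨
  (n ≤ T.length ∧ ∀ row ∈ T.take n.toNat, n ≤ row.length)
instance (T : List (List Int)) (n : Int) : Decidable (Pre_is_doubly_regular T n) := by
  unfold Pre_is_doubly_regular; infer_instance

def pvWitness_is_doubly_regular : List (List Int) × Int :=
  ([[0, 1, 0], [0, 0, 1], [1, 0, 0]], 3)

def Spec_is_doubly_regular (T : List (List Int)) (n : Int) (out : Bool) : Prop := out = is_doubly_regular_alt T n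
instance (T : List (List Int)) (n : Int) (out : Bool) : Decidable (Spec_is_doubly_regular T n out) := by unfold Spec_is_doubly_regular; infer_instance

-- ===== CLAIM (what is proved, stated in full; the proofs are below) =====
def Claim_equal_is_doubly_regular : Prop := ∀ (T : List (List Int)) (n : Int), Dom_is_doubly_regular T n → Pre_is_doubly_regular T n → Spec_is_doubly_regular T n (is_doubly_regular T n)

-- ===== LEMMAS AND PROOFS =====

lemma pv_all_congr_mem {α : Type} {l : List α} {f g : α → Bool}
    (h : ∀ x ∈ l, f x = g x) : l.all f = l.all g := by
  induction l with
  | nil => rfl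
  | cons x t ih =>
      simp only [List.all_cons, h x (by simp), ih (fun y hy => h y (by simp [hy]))]

lemma pv_sum_map_ite (l : List Int) (P : Int → Prop) [DecidablePred P] :
    (l.map (fun c => if P c then (1 : Nat) else 0)).sum = l.countP (fun c => decide (P c)) := by
  induction l with
  | nil => rfl
  | cons x t ih =>
      simp only [List.map_cons, List.sum_cons, List.countP_cons, ih, decide_eq_true_eq]
      split_ifs <;> omega

lemma pv_pyRange_pairwise (n : Int) : (PySem.List.pyRange 0 n).Pairwise (· < ·) := by
  by_cases h : 0 ≤ n
  · obtain ⟨m, rfl⟩ : ∃ m : Nat, n = (m : Int) := ⟨n.toNat, (Int.toNat_of_nonneg h).symm⟩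
    rw [PySem.List.pyRange_zero_natCast]
    exact (List.pairwise_map.2 (List.pairwise_lt_range.imp (fun {a b} h => by exact_mod_cast h)))
  · have : PySem.List.pyRange 0 n = [] := by
      refine List.eq_nil_iff_forall_not_mem.2 (fun x hx => ?_)
      have := PySem.List.mem_pyRange_one.1 hx; omega
    simp [this]

lemma pv_pvPairs_count (u v : Int) (L : List Int) (hL : L.Pairwise (· < ·)) :
    (pvPairs L).count (u, v) = if u ∈ L ∧ v ∈ L ∧ u < v then 1 else 0 := by
  induction L with
  | nil => simp [pvPairs]
  | cons a rest ih =>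
      have hall : ∀ x ∈ rest, a < x := (List.pairwise_cons.1 hL).1
      have hrest := (List.pairwise_cons.1 hL).2
      have hnd : rest.Nodup := hrest.imp (fun {x y} hxy => ne_of_lt hxy)
      have hnm : a ∉ rest := fun hm => lt_irrefl a (hall a hm)
      simp only [pvPairs, List.count_append, ih hrest]
      by_cases hu : u = a
      · have h1 : (rest.map (fun w => (a, w))).count (u, v) = rest.count v := by
          subst hu
          exact List.count_map_of_injective _ _ (fun x y hxy => (Prod.ext_iff.1 hxy).2) _
        have h2 : (if u ∈ rest ∧ v ∈ rest ∧ u < v then 1 else 0) = 0 :=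
          if_neg (fun hc => hnm (hu ▸ hc.1))
        rw [h1, h2]
        by_cases hvm : v ∈ rest
        · rw [List.count_eq_one_of_mem hnd hvm,
            if_pos ⟨hu ▸ List.mem_cons_self, List.mem_cons_of_mem _ hvm, hu ▸ hall v hvm⟩]
        · rw [List.count_eq_zero_of_not_mem hvm, if_neg]
          rintro ⟨-, hv1, hlt⟩
          rcases List.mem_cons.1 hv1 with rfl | hv2
          · exact lt_irrefl v (hu ▸ hlt)
          · exact hvm hv2
      · have h0 : (rest.map (fun w => (a, w))).count (u, v) = 0 := by
          rw [List.count_eq_zero]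
          intro hm
          obtain ⟨b, _, hb⟩ := List.mem_map.1 hm
          exact hu ((Prod.ext_iff.1 hb).1).symm
        rw [h0, Nat.zero_add]
        by_cases hc : u ∈ rest ∧ v ∈ rest ∧ u < v
        · rw [if_pos hc,
            if_pos ⟨List.mem_cons_of_mem _ hc.1, List.mem_cons_of_mem _ hc.2.1, hc.2.2⟩]
        · rw [if_neg hc, if_neg]
          rintro ⟨hu1, hv1, hlt⟩
          rcases List.mem_cons.1 hu1 with rfl | hu2
          · exact hu rfl
          rcases List.mem_cons.1 hv1 with rfl | hv2
          · exact lt_irrefl v (lt_trans (hall u hu2) hlt)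
          exact hc ⟨hu2, hv2, hlt⟩

lemma pv_mem_pvRows (T : List (List Int)) (n c r : Int) :
    r ∈ pvRows T n c ↔ (0 ≤ r ∧ r < n) ∧ r ≠ c ∧
      PySem.List.pyGetD (PySem.List.pyGetD T r []) c 0 ≠ 0 := by
  simp [pvRows, List.mem_filter, PySem.List.mem_pyRange_one]

lemma pv_count_pairs (T : List (List Int)) (n u v : Int)
    (hu : 0 ≤ u ∧ u < n) (hv : 0 ≤ v ∧ v < n) (huv : u < v) :
    (((PySem.List.pyRange 0 n).foldl (fun acc c => acc ++ pvPairs (pvRows T n c)) []).count (u, v))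
      = (PySem.List.pyRange 0 n).countP (fun w =>
            decide (w ≠ u) && decide (w ≠ v) &&
            decide (PySem.List.pyGetD (PySem.List.pyGetD T u []) w 0 ≠ 0) &&
            decide (PySem.List.pyGetD (PySem.List.pyGetD T v []) w 0 ≠ 0)) := by
  have hrange : ∀ c : Int, (pvPairs (pvRows T n c)).count (u, v) =
      if c ≠ u ∧ c ≠ v ∧ PySem.List.pyGetD (PySem.List.pyGetD T u []) c 0 ≠ 0 ∧
         PySem.List.pyGetD (PySem.List.pyGetD T v []) c 0 ≠ 0 then 1 else 0 := by
    intro c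
    rw [pv_pvPairs_count u v (pvRows T n c)
      (by unfold pvRows; exact (pv_pyRange_pairwise n).filter _)]
    refine if_congr ?_ rfl rfl
    rw [pv_mem_pvRows, pv_mem_pvRows]
    constructor
    · rintro ⟨⟨-, hcu, hTu⟩, ⟨-, hcv, hTv⟩, -⟩
      exact ⟨Ne.symm hcu, Ne.symm hcv, hTu, hTv⟩
    · rintro ⟨hcu, hcv, hTu, hTv⟩
      exact ⟨⟨hu, Ne.symm hcu, hTu⟩, ⟨hv, Ne.symm hcv, hTv⟩, huv⟩
  rw [PySem.List.foldl_append_eq_flatMap, List.nil_append, List.count_flatMap]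
  have hfe : (List.count (u, v) ∘ fun c => pvPairs (pvRows T n c)) = fun c =>
      if c ≠ u ∧ c ≠ v ∧ PySem.List.pyGetD (PySem.List.pyGetD T u []) c 0 ≠ 0 ∧
         PySem.List.pyGetD (PySem.List.pyGetD T v []) c 0 ≠ 0 then (1 : Nat) else 0 :=
    funext (fun c => hrange c)
  rw [hfe, pv_sum_map_ite]
  refine List.countP_congr (fun c _ => ?_)
  simp only [decide_eq_true_eq, Bool.and_eq_true, decide_eq_true_eq]
  tauto

lemma pv_ports_eq (T : List (List Int)) (n : Int) :
    is_doubly_regular T n = is_doubly_regular_alt T n := by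
  unfold is_doubly_regular is_doubly_regular_alt
  by_cases h : pvRowCheck T n (PySem.Int.floordiv (n - 1) 2) 0 = true
  · rw [if_pos h, if_pos h]
    refine pv_all_congr_mem (fun u hu => ?_)
    refine pv_all_congr_mem (fun v hv => ?_)
    have hu' := PySem.List.mem_pyRange_one.1 hu
    have hv' := PySem.List.mem_pyRange_one.1 hv
    have key := pv_count_pairs T n u v ⟨hu'.1, hu'.2⟩ ⟨by omega, hv'.2⟩ (by omega)
    rw [PySem.Dict.getD_foldl_insert_add_one, PySem.Dict.getD_empty, key, Int.zero_add]
  · rw [if_neg h, if_neg h]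

-- ===== VERDICT (by name: the statement is the Claim_ definition above) =====
theorem is_doubly_regular_spec : Claim_equal_is_doubly_regular := by
  intro T n _ _
  unfold Spec_is_doubly_regular
  exact pv_ports_eq T n
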